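-- pv_equiv track=rewrite | github.com/SPIRA-COVID19/noise-reduce-tool | common/textgrid_writer.py | __get_breakpoints
-- ===== SOURCE A (Python) =====
-- def __get_breakpoints(inoise):
--     expected = inoise[0] + 1
--     yield inoise[0]
--     for i in inoise[1:]:
--         if i != expected:
--             yield expected
--             yield i
--         expected = i + 1
-- ===== SOURCE B (Python) =====
-- def __get_breakpoints(inoise):
--     # Phase 1: collect the maximal runs of consecutive integers as (start, end) pairs.
--     runs = []
--     start = prev = inoise[0]
--     for x in inoise[1:]:
--         if x != prev + 1:
--             runs.append((start, prev))
--             start = x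
--         prev = x
--     runs.append((start, prev))
--     # Phase 2: yield the first run's start, then for each adjacent pair of runs
--     # yield previous run's end + 1 and the next run's start.
--     yield runs[0][0]
--     for (s1, e1), (s2, e2) in zip(runs, runs[1:]):
--         yield e1 + 1
--         yield s2
-- ===== Notes on version B (the rewrite author's own statement) =====
-- stated objective: alternative
-- what changed: B first materialises the list of maximal consecutive runs (start,end) and then emits breakpoints from adjacent run boundaries, instead of A's single pass that tracks an 'expected' value and yields on each mismatch.
import Mathlib
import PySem

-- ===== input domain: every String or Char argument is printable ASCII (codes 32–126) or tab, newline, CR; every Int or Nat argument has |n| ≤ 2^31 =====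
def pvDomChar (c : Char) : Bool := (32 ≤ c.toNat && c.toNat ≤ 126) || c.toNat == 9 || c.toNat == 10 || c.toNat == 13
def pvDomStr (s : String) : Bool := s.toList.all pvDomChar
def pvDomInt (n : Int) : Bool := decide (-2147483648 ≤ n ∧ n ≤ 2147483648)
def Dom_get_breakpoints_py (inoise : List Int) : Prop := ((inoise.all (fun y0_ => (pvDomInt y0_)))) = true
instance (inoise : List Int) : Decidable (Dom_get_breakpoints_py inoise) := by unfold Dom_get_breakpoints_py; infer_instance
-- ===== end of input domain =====

-- B groups the input into maximal consecutive runs and emits breakpoints from adjacent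
-- run boundaries (alternative decomposition of A's mismatch-tracking pass); return values
-- proved equal on nonempty lists (A raises IndexError on [] when first consumed).

-- ===== PORT A =====
-- A: track expected = previous + 1; on mismatch yield expected and the current value.
def get_breakpoints_py (inoise : List Int) : List Int :=
  match inoise with
  | [] => []    -- unreachable under Pre_: Python raises IndexError on inoise[0]
  | x :: rest =>
    (rest.foldl
      (fun (st : Int × List Int) i =>
        if i ≠ st.1 then (i + 1, st.2 ++ [st.1, i]) else (i + 1, st.2))
      (x + 1, [x])).2

-- ===== PORT B =====
-- B phase 1: the loop collecting maximal consecutive runs as (start, end) pairs.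
def pvRunsLoop (start prev : Int) (xs : List Int) : List (Int × Int) :=
  match xs with
  | [] => [(start, prev)]
  | x :: xs => if x ≠ prev + 1 then (start, prev) :: pvRunsLoop x x xs
               else pvRunsLoop start x xs

def get_breakpoints_py_alt (inoise : List Int) : List Int :=
  match inoise with
  | [] => []    -- unreachable under Pre_: Python raises IndexError on inoise[0]
  | x :: rest =>
    let runs := pvRunsLoop x x rest
    -- phase 2: first run's start, then for adjacent runs: prev end + 1, next start
    (runs.headD (0, 0)).1 ::
      (runs.zip runs.tail).flatMap (fun p => [p.1.2 + 1, p.2.1])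

-- ===== PRECONDITION & SPEC =====
-- Pre_ excludes only the empty list, on which the Python generator raises IndexError
-- when first consumed.
def Pre_get_breakpoints_py (inoise : List Int) : Prop := inoise ≠ []
instance (inoise : List Int) : Decidable (Pre_get_breakpoints_py inoise) := by
  unfold Pre_get_breakpoints_py; infer_instance
def pvWitness_get_breakpoints_py : List Int := ([3, 4, 7, 8])

def Spec_get_breakpoints_py (inoise : List Int) (out : List Int) : Prop := out = get_breakpoints_py_alt inoise
instance (inoise : List Int) (out : List Int) : Decidable (Spec_get_breakpoints_py inoise out) := by unfold Spec_get_breakpoints_py; infer_instance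

-- ===== CLAIM (what is proved, stated in full; the proofs are below) =====
def Claim_equal_get_breakpoints_py : Prop := ∀ (inoise : List Int), Dom_get_breakpoints_py inoise → Pre_get_breakpoints_py inoise → Spec_get_breakpoints_py inoise (get_breakpoints_py inoise)

-- ===== LEMMAS AND PROOFS =====

-- reference form of the breakpoint stream after the first element
def pvBrk (prev : Int) (xs : List Int) : List Int :=
  match xs with
  | [] => []
  | x :: xs => if x ≠ prev + 1 then (prev + 1) :: x :: pvBrk x xs else pvBrk x xs

theorem pvA_foldl (xs : List Int) (prev : Int) (acc : List Int) :
    (xs.foldl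
      (fun (st : Int × List Int) i =>
        if i ≠ st.1 then (i + 1, st.2 ++ [st.1, i]) else (i + 1, st.2))
      (prev + 1, acc)).2 = acc ++ pvBrk prev xs := by
  induction xs generalizing prev acc with
  | nil => simp [pvBrk]
  | cons x xs ih =>
    rw [pvBrk]
    by_cases h : x = prev + 1
    · subst h
      simpa [List.foldl] using ih (prev + 1) acc
    · have h2 := ih x (acc ++ [prev + 1, x])
      simp only [List.append_assoc, List.cons_append, List.nil_append] at h2
      simpa [List.foldl, h] using h2

theorem pvRunsLoop_head (start prev : Int) (xs : List Int) :
    ∃ e rest, pvRunsLoop start prev xs = (start, e) :: rest := by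
  induction xs generalizing start prev with
  | nil => exact ⟨prev, [], rfl⟩
  | cons x xs ih =>
    by_cases h : x = prev + 1
    · subst h
      simpa [pvRunsLoop] using ih start (prev + 1)
    · exact ⟨prev, pvRunsLoop x x xs, by simp [pvRunsLoop, h]⟩

theorem pvB_emit (start prev : Int) (xs : List Int) :
    ((pvRunsLoop start prev xs).zip (pvRunsLoop start prev xs).tail).flatMap
      (fun p => [p.1.2 + 1, p.2.1]) = pvBrk prev xs := by
  induction xs generalizing start prev with
  | nil => simp [pvRunsLoop, pvBrk]
  | cons x xs ih =>
    by_cases h : x = prev + 1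
    · subst h
      simpa [pvRunsLoop, pvBrk] using ih start (prev + 1)
    · obtain ⟨e, rest, he⟩ := pvRunsLoop_head x x xs
      have h2 := ih x x
      rw [he] at h2
      simp only [pvRunsLoop, pvBrk, if_pos h, he] at h2 ⊢
      simp_all

-- ===== VERDICT (by name: the statement is the Claim_ definition above) =====
theorem get_breakpoints_py_spec : Claim_equal_get_breakpoints_py := by
  intro inoise _ hpre
  unfold Spec_get_breakpoints_py
  match inoise with
  | [] => exact absurd rfl hpre
  | x :: rest =>
    obtain ⟨e, rs, he⟩ := pvRunsLoop_head x x rest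
    simp only [get_breakpoints_py, get_breakpoints_py_alt]
    rw [pvA_foldl, ← pvB_emit x x rest, he]
    simp
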